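-- pv_equiv track=rewrite | github.com/iron-woodman/avito_kitchen_feed_maker | main.py | union_lists
-- ===== SOURCE A (Python) =====
-- def union_lists(list1: list, list2: list) -> list:
--     """
--     Объединение списков с равномерным распределением элементов внутри них.
--     Предусмотрен вариант, когда один из списков пустой.
--
--     :param list1: Первый список.
--     :param list2: Второй список.
--     :return: Объединенный список.
--     """
--     res_list = []
--
--     if not list1:
--         return list2[:]  # Возвращаем копию list2, чтобы не менять исходный список
--     if not list2:
--         return list1[:]  # Возвращаем копию list1, чтобы не менять исходный список
--
--     big_list = []
--     small_list = []
--
--     if len(list1) > len(list2):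
--         big_list = list1
--         small_list = list2
--         proportion = len(list1) // len(list2)  # Целочисленное деление
--     else:
--         big_list = list2
--         small_list = list1
--         proportion = len(list2) // len(list1)  # Целочисленное деление
--
--     big_list_elements_counter = 0
--     small_list_index = 0
--
--     for item in big_list:
--         res_list.append(item)
--         big_list_elements_counter += 1
--         if small_list_index < len(small_list) and big_list_elements_counter == proportion:
--             res_list.append(small_list[small_list_index])
--             small_list_index += 1
--             big_list_elements_counter = 0
--
--     # Добавляем оставшиеся элементы из small_list, если они есть
--     while small_list_index < len(small_list):
--          res_list.append(small_list[small_list_index])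
--          small_list_index += 1
--
--     return res_list
-- ===== SOURCE B (Python) =====
-- def union_lists(list1: list, list2: list) -> list:
--     if not list1:
--         return list2[:]
--     if not list2:
--         return list1[:]
--     if len(list1) > len(list2):
--         big, small = list1, list2
--     else:
--         big, small = list2, list1
--     p = len(big) // len(small)
--     res = []
--     si = 0
--     start = 0
--     while start < len(big):
--         chunk = big[start:start + p]
--         res.extend(chunk)
--         if len(chunk) == p and si < len(small):
--             res.append(small[si])
--             si += 1
--         start += p
--     res.extend(small[si:])
--     return res
-- ===== Notes on version B (the rewrite author's own statement) =====
-- stated objective: alternative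
-- what changed: Replaces A's single per-element loop with a counter and index bookkeeping by a recursive decomposition that consumes the big list in slices of size proportion, inserting one small element after each full chunk and splicing the small tail at the end.
import Mathlib
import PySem

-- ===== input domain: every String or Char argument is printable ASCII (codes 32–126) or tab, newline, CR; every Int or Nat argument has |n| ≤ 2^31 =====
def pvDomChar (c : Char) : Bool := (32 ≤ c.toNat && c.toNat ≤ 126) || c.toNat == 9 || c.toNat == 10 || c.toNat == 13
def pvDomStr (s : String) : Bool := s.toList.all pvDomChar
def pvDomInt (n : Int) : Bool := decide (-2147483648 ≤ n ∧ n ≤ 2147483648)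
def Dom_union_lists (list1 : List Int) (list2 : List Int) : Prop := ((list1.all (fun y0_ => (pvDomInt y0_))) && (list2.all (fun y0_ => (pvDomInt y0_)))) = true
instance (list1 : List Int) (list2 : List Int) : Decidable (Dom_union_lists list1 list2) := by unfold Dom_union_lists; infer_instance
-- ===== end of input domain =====

-- B replaces A's per-element loop with its counter/reset bookkeeping by an index loop that emits the big
-- list chunk by chunk (slices of size proportion), inserting one small element after each full chunk
-- (objective: alternative, same cost).

-- ===== PORT A =====
-- A's loop body: append item, bump counter; on counter = proportion (and small not exhausted) insert next small element and reset.
def stepA (small : List Int) (p : Nat) (s : List Int × Nat × Nat) (item : Int) : List Int × Nat × Nat :=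
  let res := s.1 ++ [item]
  let c := s.2.1 + 1
  let si := s.2.2
  -- small.getD si 0 = Python small[small_list_index]; exact since the guard gives si < small.length
  if si < small.length ∧ c = p then (res ++ [small.getD si 0], 0, si + 1) else (res, c, si)

-- A's trailing while loop: append small[si], si += 1 while si < len(small)
def tailA (small : List Int) (res : List Int) (si : Nat) : List Int :=
  if si < small.length then tailA small (res ++ [small.getD si 0]) (si + 1) else res
termination_by small.length - si

def union_lists (list1 : List Int) (list2 : List Int) : List Int :=
  if list1 = [] then list2
  else if list2 = [] then list1
  else
    let bsp : List Int × List Int × Nat :=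
      if list1.length > list2.length then (list1, list2, list1.length / list2.length)
      else (list2, list1, list2.length / list1.length)
    let big := bsp.1
    let small := bsp.2.1
    let p := bsp.2.2
    let st := big.foldl (stepA small p) ([], 0, 0)
    tailA small st.1 st.2.2

-- ===== PORT B =====
-- B's while loop: at index start take the slice big[start:start+p]; after a full slice insert small[si].
def chunkLoop (big : List Int) (small : List Int) (p : Nat) (res : List Int) (si : Nat) (start : Nat) : List Int :=
  if p = 0 then res ++ small.drop si        -- unreachable totality guard (every call site has 1 ≤ p)
  else if start < big.length then
    let chunk := PySem.List.slice big (some (start : Int)) (some ((start : Int) + (p : Int)))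
    let res' := res ++ chunk
    if chunk.length = p ∧ si < small.length then
      chunkLoop big small p (res' ++ [small.getD si 0]) (si + 1) (start + p)
    else
      chunkLoop big small p res' si (start + p)
  else res ++ small.drop si                 -- res.extend(small[si:])
termination_by big.length - start

def union_lists_alt (list1 : List Int) (list2 : List Int) : List Int :=
  if list1 = [] then list2
  else if list2 = [] then list1
  else
    let bs : List Int × List Int :=
      if list1.length > list2.length then (list1, list2) else (list2, list1)
    let big := bs.1
    let small := bs.2
    chunkLoop big small (big.length / small.length) [] 0 0

-- ===== PRECONDITION & SPEC =====
def Spec_union_lists (list1 : List Int) (list2 : List Int) (out : List Int) : Prop := out = union_lists_alt list1 list2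
instance (list1 : List Int) (list2 : List Int) (out : List Int) : Decidable (Spec_union_lists list1 list2 out) := by unfold Spec_union_lists; infer_instance

-- ===== CLAIM (what is proved, stated in full; the proofs are below) =====
def Claim_equal_union_lists : Prop := ∀ (list1 : List Int) (list2 : List Int), Dom_union_lists list1 list2 → Spec_union_lists list1 list2 (union_lists list1 list2)

-- ===== LEMMAS AND PROOFS =====

-- bridge between the two loops: process the suffix of big chunk by chunk, then splice in small[si:]
def weave (small : List Int) (p : Nat) (rest : List Int) (si : Nat) : List Int :=
  if rest = [] then small.drop si
  else if p = 0 then small.drop si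
  else
    let chunk := rest.take p
    let tl := rest.drop p
    if chunk.length = p ∧ si < small.length then
      chunk ++ [small.getD si 0] ++ weave small p tl (si + 1)
    else
      chunk ++ weave small p tl si
termination_by rest.length
decreasing_by all_goals
  · have : rest.length ≠ 0 := by simpa [List.length_eq_zero_iff] using ‹¬ rest = []›
    simp only [List.length_drop]; omega

-- A's trailing while loop appends exactly small[si:]
lemma tailA_eq (small : List Int) (res : List Int) (si : Nat) :
    tailA small res si = res ++ small.drop si := by
  fun_induction tailA small res si with
  | case1 res si h ih =>
    rw [ih, List.append_assoc, List.drop_eq_getElem_cons h]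
    simp [List.getD, List.getElem?_eq_getElem h]
  | case2 res si h =>
    simp [List.drop_of_length_le (by omega : small.length ≤ si)]

-- no trigger while the counter stays below p
lemma foldl_no_trigger (small : List Int) (p : Nat) :
    ∀ (l res : List Int) (c si : Nat), c + l.length < p →
    List.foldl (stepA small p) (res, c, si) l = (res ++ l, c + l.length, si) := by
  intro l
  induction l with
  | nil => intro res c si _; simp
  | cons a l ih =>
    intro res c si h
    have hne : ¬ (si < small.length ∧ c + 1 = p) := by
      rintro ⟨-, h2⟩; simp at h; omega
    simp only [List.foldl_cons, stepA, if_neg hne]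
    rw [ih (res ++ [a]) (c + 1) si (by simp at h ⊢; omega)]
    simp; omega

-- single trigger exactly at the end of a full chunk
lemma foldl_trigger (small : List Int) (p : Nat) :
    ∀ (l res : List Int) (c si : Nat), l ≠ [] → c + l.length = p → si < small.length →
    List.foldl (stepA small p) (res, c, si) l =
      (res ++ l ++ [small.getD si 0], 0, si + 1) := by
  intro l
  induction l with
  | nil => intro _ _ _ h; exact absurd rfl h
  | cons a l ih =>
    intro res c si _ hp hsi
    by_cases hl : l = []
    · subst hl
      have : c + 1 = p := by simpa using hp
      simp [stepA, hsi, this]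
    · have hlt : c + 1 ≠ p := by
        have : 1 ≤ l.length := List.length_pos_iff.mpr hl
        simp at hp; omega
      simp only [List.foldl_cons, stepA]
      rw [if_neg (by rintro ⟨-, h⟩; exact hlt h)]
      rw [ih (res ++ [a]) (c + 1) si hl (by simp at hp ⊢; omega) hsi]
      simp

-- once small is exhausted the loop only appends
lemma foldl_exhausted (small : List Int) (p : Nat) :
    ∀ (l res : List Int) (c si : Nat), small.length ≤ si →
    List.foldl (stepA small p) (res, c, si) l = (res ++ l, c + l.length, si) := by
  intro l
  induction l with
  | nil => intro res c si _; simp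
  | cons a l ih =>
    intro res c si h
    simp only [List.foldl_cons, stepA]
    rw [if_neg (by rintro ⟨h1, -⟩; omega)]
    rw [ih (res ++ [a]) (c + 1) si h]
    simp; omega

lemma weave_exhausted (small : List Int) (p : Nat) (hp : 1 ≤ p) :
    ∀ (rest : List Int) (si : Nat), small.length ≤ si →
    weave small p rest si = rest := by
  intro rest si
  fun_induction weave small p rest si with
  | case1 si => intro hle; simp [List.drop_of_length_le hle]
  | case2 rest si hne hzero => omega
  | case3 rest si hne hzero chunk tl hcond ih => intro hle; exact absurd hcond.2 (by omega)
  | case4 rest si hne hzero chunk tl hcond ih =>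
    intro hle
    rw [ih hle]
    exact List.take_append_drop _ _

-- A's counter loop computes weave
lemma main_lemma (small : List Int) (p : Nat) (hp : 1 ≤ p) :
    ∀ (rest : List Int) (si : Nat) (res : List Int),
    (List.foldl (stepA small p) (res, 0, si) rest).1 ++
      small.drop (List.foldl (stepA small p) (res, 0, si) rest).2.2
    = res ++ weave small p rest si := by
  intro rest si
  fun_induction weave small p rest si with
  | case1 si => intro res; simp
  | case2 rest si hne hzero => omega
  | case3 rest si hne hzero chunk tl hcond ih =>
    intro res
    have hchunk : chunk ≠ [] := by
      intro h
      have := hcond.1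
      rw [h] at this
      simp at this; omega
    conv_lhs => rw [show rest = chunk ++ tl from (List.take_append_drop p rest).symm]
    rw [List.foldl_append,
        foldl_trigger small p chunk res 0 si hchunk (by simpa using hcond.1) hcond.2,
        ih]
    simp
  | case4 rest si hne hzero chunk tl hcond ih =>
    intro res
    by_cases hsi : si < small.length
    · have h2 : chunk.length = min p rest.length := List.length_take ..
      have hlen : rest.length < p := by
        have h1 : chunk.length ≠ p := fun h => hcond ⟨h, hsi⟩
        omega
      rw [foldl_no_trigger small p rest res 0 si (by omega)]
      have htl : tl = [] := List.drop_eq_nil_iff.mpr (by omega)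
      have hch : chunk = rest := List.take_of_length_le (by omega)
      rw [hch, htl]
      simp [weave]
    · replace hsi := Nat.le_of_not_lt hsi
      rw [foldl_exhausted small p rest res 0 si hsi,
          weave_exhausted small p hp tl si hsi,
          List.drop_of_length_le hsi,
          show chunk ++ tl = rest from List.take_append_drop p rest]
      simp

-- B's index loop computes weave on the remaining suffix of big
lemma chunkLoop_eq_weave (big small : List Int) (p : Nat) (hp : 1 ≤ p) :
    ∀ (res : List Int) (si start : Nat),
    chunkLoop big small p res si start = res ++ weave small p (big.drop start) si := by
  intro res si start
  fun_induction chunkLoop big small p res si start with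
  | case1 res si start hz => omega
  | case2 res si start hz hlt chunk res' hcond ih =>
    have hslice : chunk = (big.drop start).take p := PySem.List.slice_natCast_add big start p
    have hrest : big.drop start ≠ [] := by
      intro h; rw [List.drop_eq_nil_iff] at h; omega
    rw [ih]
    conv_rhs => rw [weave]
    rw [if_neg hrest, if_neg hz, if_pos (hslice ▸ hcond)]
    simp only [show res' = res ++ chunk from rfl, hslice, List.drop_drop, List.append_assoc]
  | case3 res si start hz hlt chunk res' hcond ih =>
    have hslice : chunk = (big.drop start).take p := PySem.List.slice_natCast_add big start p
    have hrest : big.drop start ≠ [] := by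
      intro h; rw [List.drop_eq_nil_iff] at h; omega
    rw [ih]
    conv_rhs => rw [weave]
    rw [if_neg hrest, if_neg hz, if_neg (hslice ▸ hcond)]
    simp only [show res' = res ++ chunk from rfl, hslice, List.drop_drop, List.append_assoc]
  | case4 res si start hz hge =>
    rw [show big.drop start = ([] : List Int) from List.drop_eq_nil_iff.mpr (by omega), weave]
    simp

-- ===== VERDICT (by name: the statement is the Claim_ definition above) =====
theorem union_lists_spec : Claim_equal_union_lists := by
  intro list1 list2 _
  unfold Spec_union_lists union_lists union_lists_alt
  by_cases h1 : list1 = []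
  · simp [h1]
  · by_cases h2 : list2 = []
    · simp [h1, h2]
    · simp only [if_neg h1, if_neg h2]
      by_cases hlen : list1.length > list2.length
      · have hp : 1 ≤ list1.length / list2.length :=
          (Nat.one_le_div_iff (List.length_pos_iff.mpr h2)).mpr (le_of_lt hlen)
        simp only [if_pos hlen]
        rw [tailA_eq, main_lemma list2 _ hp, chunkLoop_eq_weave list1 list2 _ hp]
        simp
      · have hp : 1 ≤ list2.length / list1.length :=
          (Nat.one_le_div_iff (List.length_pos_iff.mpr h1)).mpr (by omega)
        simp only [if_neg hlen]
        rw [tailA_eq, main_lemma list1 _ hp, chunkLoop_eq_weave list2 list1 _ hp]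
        simp
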